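-- pv_equiv track=rewrite | github.com/BEA-Sensors-Americas/flatscan_sdk | utils/flatscan_occupancy.py | get_presences_in_zones
-- ===== SOURCE A (Python) =====
-- import math
--
-- def get_presences_in_zones(mdi, limit, num_zones):
--     distance = mdi['distances']
--     num_spots = len(distance)
--     spots_per_zone = math.floor(num_spots / num_zones)
--     presences = []
--     for i in range(num_zones):
--         presences.append(any([d < limit for d in distance[i*spots_per_zone:(i+1)*spots_per_zone]]))
--     return presences
-- ===== SOURCE B (Python) =====
-- import math
--
-- def get_presences_in_zones(mdi, limit, num_zones):
--     distance = mdi['distances']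
--     spots_per_zone = math.floor(len(distance) / num_zones)
--     result = [False] * num_zones
--     for j in range(len(result) * spots_per_zone):
--         if distance[j] < limit:
--             result[j // spots_per_zone] = True
--     return result
-- ===== Notes on version B (the rewrite author's own statement) =====
-- stated objective: alternative
-- what changed: Replaces the per-zone slice-and-any loop with a single flat pass over the usable spots that scatters each spot into its zone bucket (result[j // spots_per_zone]), with no intermediate slice lists.
import Mathlib
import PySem

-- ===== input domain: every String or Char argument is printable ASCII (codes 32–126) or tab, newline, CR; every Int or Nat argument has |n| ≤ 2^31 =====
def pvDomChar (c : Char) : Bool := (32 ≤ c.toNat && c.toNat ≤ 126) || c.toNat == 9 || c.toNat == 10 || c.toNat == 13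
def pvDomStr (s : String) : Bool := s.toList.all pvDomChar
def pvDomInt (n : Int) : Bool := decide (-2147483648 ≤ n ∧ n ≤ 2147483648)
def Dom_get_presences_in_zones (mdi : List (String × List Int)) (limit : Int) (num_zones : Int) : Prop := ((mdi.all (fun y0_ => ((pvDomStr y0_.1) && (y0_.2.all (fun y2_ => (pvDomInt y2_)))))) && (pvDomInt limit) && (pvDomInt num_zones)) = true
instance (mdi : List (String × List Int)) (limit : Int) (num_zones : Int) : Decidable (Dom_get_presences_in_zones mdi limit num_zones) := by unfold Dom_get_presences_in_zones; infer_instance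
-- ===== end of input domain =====

-- B replaces A's per-zone slice-and-any loop by one flat pass scattering each spot into its zone bucket; same cost, different traversal.


-- ===== PORT A =====
-- mdi['distances'] on the association list: first matching key (Pre_ requires it to exist)
def get_presences_in_zones (mdi : List (String × List Int)) (limit : Int) (num_zones : Int) : List Bool :=
  match mdi.lookup "distances" with
  | none => []          -- KeyError in Python; excluded by Pre_
  | some distance =>
    let num_spots : Int := distance.length
    let spots_per_zone := PySem.Int.floordiv num_spots num_zones   -- math.floor(num_spots / num_zones); exact on Dom's sizes
    (PySem.List.pyRange 0 num_zones 1).foldl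
      (fun presences i =>
        presences ++ [(PySem.List.slice distance (some (i * spots_per_zone)) (some ((i + 1) * spots_per_zone))).any
          (fun d => decide (d < limit))]) []

-- ===== PORT B =====
def get_presences_in_zones_alt (mdi : List (String × List Int)) (limit : Int) (num_zones : Int) : List Bool :=
  match mdi.lookup "distances" with
  | none => []          -- KeyError in Python; excluded by Pre_
  | some distance =>
    let spots_per_zone := PySem.Int.floordiv (distance.length : Int) num_zones
    let result := List.replicate num_zones.toNat false   -- [False] * num_zones ([] when num_zones ≤ 0)
    (PySem.List.pyRange 0 ((result.length : Int) * spots_per_zone) 1).foldl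
      (fun res j =>
        if PySem.List.pyGetD distance j 0 < limit then
          PySem.List.pySetD res (PySem.Int.floordiv j spots_per_zone) true
        else res) result

-- ===== PRECONDITION & SPEC =====
-- Pre_ excludes exactly the inputs where A raises: a missing 'distances' key (KeyError) and num_zones = 0 (ZeroDivisionError).
def Pre_get_presences_in_zones (mdi : List (String × List Int)) (limit : Int) (num_zones : Int) : Prop :=
  (mdi.lookup "distances").isSome ∧ num_zones ≠ 0
instance (mdi : List (String × List Int)) (limit : Int) (num_zones : Int) : Decidable (Pre_get_presences_in_zones mdi limit num_zones) := by unfold Pre_get_presences_in_zones; infer_instance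

def pvWitness_get_presences_in_zones : (List (String × List Int)) × Int × Int := ([("distances", [1, 5, 3, 9])], 4, 2)

def Spec_get_presences_in_zones (mdi : List (String × List Int)) (limit : Int) (num_zones : Int) (out : List Bool) : Prop := out = get_presences_in_zones_alt mdi limit num_zones
instance (mdi : List (String × List Int)) (limit : Int) (num_zones : Int) (out : List Bool) : Decidable (Spec_get_presences_in_zones mdi limit num_zones out) := by unfold Spec_get_presences_in_zones; infer_instance

-- ===== CLAIM (what is proved, stated in full; the proofs are below) =====
def Claim_equal_get_presences_in_zones : Prop := ∀ (mdi : List (String × List Int)) (limit : Int) (num_zones : Int), Dom_get_presences_in_zones mdi limit num_zones → Pre_get_presences_in_zones mdi limit num_zones → Spec_get_presences_in_zones mdi limit num_zones (get_presences_in_zones mdi limit num_zones)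

-- ===== LEMMAS AND PROOFS =====

-- B's flat scatter step, at the Nat level
def pvStep (l : List Int) (L : Int) (s : Nat) (R : List Bool) (j : Nat) : List Bool :=
  if l.getD j 0 < L then R.set (j / s) true else R

-- A's per-zone test, at the Nat level
def pvF (l : List Int) (L : Int) (s k : Nat) : Bool :=
  ((l.drop (k * s)).take s).any (fun d => decide (d < L))

lemma pvStep_length (l : List Int) (L : Int) (s : Nat) (js : List Nat) (R : List Bool) :
    (js.foldl (pvStep l L s) R).length = R.length := by
  induction js generalizing R with
  | nil => rfl
  | cons j js ih => simp only [List.foldl_cons]; rw [ih]; unfold pvStep; split <;> simp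

lemma pvStep_one_getD (l : List Int) (L : Int) (s : Nat) (R : List Bool) (j k : Nat)
    (hk : k < R.length) :
    (pvStep l L s R j).getD k false
      = (R.getD k false || (decide (j / s = k) && decide (l.getD j 0 < L))) := by
  unfold pvStep
  by_cases hp : l.getD j 0 < L
  · rw [if_pos hp]
    have hp' : l[j]?.getD 0 < L := by simpa [List.getD_eq_getElem?_getD] using hp
    by_cases hjk : j / s = k
    · subst hjk
      rw [List.getD_eq_getElem?_getD, List.getElem?_set_self (by omega)]
      simp [hp']
    · rw [List.getD_eq_getElem?_getD, List.getElem?_set_ne (by omega)]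
      simp [hjk]
  · rw [if_neg hp]
    have hp' : ¬ l[j]?.getD 0 < L := by simpa [List.getD_eq_getElem?_getD] using hp
    simp [hp']

lemma pvStep_getD (l : List Int) (L : Int) (s : Nat) (js : List Nat) (R : List Bool)
    (k : Nat) (hk : k < R.length) :
    (js.foldl (pvStep l L s) R).getD k false
      = (R.getD k false || js.any (fun j => decide (j / s = k) && decide (l.getD j 0 < L))) := by
  induction js generalizing R with
  | nil => simp
  | cons j js ih =>
    simp only [List.foldl_cons, List.any_cons]
    have hlen : (pvStep l L s R j).length = R.length := by unfold pvStep; split <;> simp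
    rw [ih _ (by omega), pvStep_one_getD l L s R j k hk, Bool.or_assoc]

lemma pv_take_drop_eq_map_range (l : List Int) (a c : Nat) (h : a + c ≤ l.length) :
    (l.drop a).take c = (List.range c).map (fun t => l.getD (a + t) 0) := by
  apply List.ext_getElem
  · simp; omega
  · intro i h1 h2
    simp only [List.getElem_take, List.getElem_drop, List.getElem_map, List.getElem_range]
    rw [List.getD_eq_getElem l 0 (by simp at h1 ⊢; omega)]

lemma pv_any_zone (l : List Int) (L : Int) (s Z k : Nat) (hk : k < Z) (hlen : Z * s ≤ l.length) :
    pvF l L s k = (List.range (Z * s)).any (fun j => decide (j / s = k) && decide (l.getD j 0 < L)) := by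
  unfold pvF
  rw [pv_take_drop_eq_map_range l (k * s) s (by nlinarith)]
  rw [List.any_map]
  rcases Nat.eq_zero_or_pos s with hs | hs
  · subst hs; simp
  rw [Bool.eq_iff_iff]
  simp only [List.any_eq_true, List.mem_range, Function.comp]
  constructor
  · rintro ⟨t, ht, hpt⟩
    refine ⟨k * s + t, by nlinarith, ?_⟩
    have hdiv : (k * s + t) / s = k := by
      rw [mul_comm, Nat.mul_add_div hs, Nat.div_eq_of_lt ht]
      omega
    simp only [hdiv, decide_true, Bool.true_and]
    exact hpt
  · rintro ⟨j, hj, hpj⟩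
    simp only [Bool.and_eq_true, decide_eq_true_eq] at hpj
    obtain ⟨hdiv, hpl⟩ := hpj
    have hm := Nat.div_add_mod j s
    rw [hdiv] at hm
    have hlt := Nat.mod_lt j hs
    have hcomm : k * s = s * k := mul_comm k s
    have h1 : k * s ≤ j := hcomm ▸ Nat.le.intro hm
    have h2 : j < k * s + s := by rw [hcomm, ← hm]; exact Nat.add_lt_add_left hlt _
    refine ⟨j - k * s, by omega, ?_⟩
    have hjj : k * s + (j - k * s) = j := by omega
    simp only [hjj]
    simpa [List.getD_eq_getElem?_getD] using hpl

lemma pv_scatter (l : List Int) (L : Int) (s Z : Nat) (hlen : Z * s ≤ l.length) :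
    (List.range (Z * s)).foldl (pvStep l L s) (List.replicate Z false)
      = (List.range Z).map (pvF l L s) := by
  apply List.ext_getElem
  · rw [pvStep_length]; simp
  · intro k h1 h2
    have hk : k < Z := by simpa using h2
    have hlen1 : (((List.range (Z*s)).foldl (pvStep l L s) (List.replicate Z false))).length = Z := by
      rw [pvStep_length]; simp
    have := pvStep_getD l L s (List.range (Z * s)) (List.replicate Z false) k (by simpa using hk)
    rw [List.getD_eq_getElem _ false (by omega)] at this
    simp only [List.getElem_map, List.getElem_range]
    rw [this, List.getD_eq_getElem _ false (by simpa using hk)]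
    simp only [List.getElem_replicate, Bool.false_or]
    exact (pv_any_zone l L s Z k hk hlen).symm

-- ===== VERDICT (by name: the statement is the Claim_ definition above) =====
lemma pv_A_eq (l : List Int) (L : Int) (Z : Nat) (s : Nat) (hs : PySem.Int.floordiv (l.length : Int) (Z : Int) = (s : Int)) :
    (PySem.List.pyRange 0 (Z : Int) 1).foldl
      (fun presences i =>
        presences ++ [(PySem.List.slice l (some (i * PySem.Int.floordiv (l.length : Int) (Z : Int)))
          (some ((i + 1) * PySem.Int.floordiv (l.length : Int) (Z : Int)))).any (fun d => decide (d < L))]) []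
    = (List.range Z).map (pvF l L s) := by
  rw [hs, PySem.List.pyRange_zero_natCast, List.foldl_map, PySem.List.foldl_append_singleton_eq_map, List.nil_append]
  apply List.map_congr_left
  intro k _
  have e1 : ((k : Int) * (s : Int)) = ((k * s : Nat) : Int) := by push_cast; ring
  have e2 : (((k : Int) + 1) * (s : Int)) = ((k * s : Nat) : Int) + ((s : Nat) : Int) := by push_cast; ring
  rw [e1, e2, PySem.List.slice_natCast_add]
  rfl

lemma pv_B_eq (l : List Int) (L : Int) (Z : Nat) (s : Nat) (hs : PySem.Int.floordiv (l.length : Int) (Z : Int) = (s : Int)) :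
    (PySem.List.pyRange 0 (((List.replicate Z false).length : Int) * PySem.Int.floordiv (l.length : Int) (Z : Int)) 1).foldl
      (fun res j =>
        if PySem.List.pyGetD l j 0 < L then
          PySem.List.pySetD res (PySem.Int.floordiv j (PySem.Int.floordiv (l.length : Int) (Z : Int))) true
        else res) (List.replicate Z false)
    = (List.range (Z * s)).foldl (pvStep l L s) (List.replicate Z false) := by
  rw [hs]
  have e : (((List.replicate Z false).length : Int) * (s : Int)) = ((Z * s : Nat) : Int) := by
    simp
  rw [e, PySem.List.pyRange_zero_natCast, List.foldl_map]
  have efun : (fun (res : List Bool) (j : Nat) =>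
      if PySem.List.pyGetD l (j : Int) 0 < L then
        PySem.List.pySetD res (PySem.Int.floordiv (j : Int) (s : Int)) true
      else res) = pvStep l L s := by
    funext R j
    unfold pvStep
    simp only [PySem.Int.floordiv_natCast, PySem.List.pyGetD_natCast, PySem.List.pySetD_natCast]
  rw [efun]

theorem get_presences_in_zones_spec : Claim_equal_get_presences_in_zones := by
  intro mdi L z _hdom hpre
  obtain ⟨hkey, hz⟩ := hpre
  unfold Spec_get_presences_in_zones get_presences_in_zones get_presences_in_zones_alt
  obtain ⟨l, hl⟩ := Option.isSome_iff_exists.mp hkey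
  rw [hl]
  rcases lt_or_gt_of_ne hz with hneg | hpos
  · -- num_zones < 0: both sides are []
    simp only []
    rw [PySem.List.pyRange_one_eq_nil (by omega)]
    have hZ0 : z.toNat = 0 := Int.toNat_of_nonpos (by omega)
    rw [hZ0]
    simp [PySem.List.pyRange_one_eq_nil]
  · -- num_zones > 0
    have hzZ : z = (z.toNat : Int) := (Int.toNat_of_nonneg (by omega)).symm
    set Z := z.toNat with hZdef
    have hZpos : 0 < Z := by omega
    set s := l.length / Z with hsdef
    have hs : PySem.Int.floordiv (l.length : Int) (z : Int) = (s : Int) := by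
      rw [hzZ, hsdef]; exact PySem.Int.floordiv_natCast l.length Z
    simp only []
    rw [hzZ] at hs ⊢
    rw [pv_A_eq l L Z s hs, pv_B_eq l L Z s hs, pv_scatter]
    calc Z * s = s * Z := mul_comm Z s
      _ ≤ l.length := Nat.div_mul_le_self l.length Z
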